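-- pv_equiv track=rewrite | github.com/branbg99/App-contest-project2 | projectresearchbargithub/tools/vectorize.py | _expand_and_normalize_tokens
-- ===== SOURCE A (Python) =====
-- from typing import Dict, Iterable, List, Tuple
--
-- def _singularize(tok: str) -> str:
--     t = tok.lower()
--     if len(t) < 4:
--         return t
--     if t.endswith('ies') and len(t) > 4:
--         return t[:-3] + 'y'
--     if t.endswith('sses') or t.endswith('zzes'):
--         return t[:-2]
--     if t.endswith('es') and (t[-3] in 'sxz' or t[-4:-2] in ('ch', 'sh')):
--         return t[:-2]
--     if t.endswith('s') and not t.endswith('ss'):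
--         return t[:-1]
--     return t
--
-- _CANON_MATH = {
--     r'\\varepsilon': r'\\epsilon',
--     r'\\varphi': r'\\phi',
--     r'\\vartheta': r'\\theta',
--     r'\\varsigma': r'\\sigma',
-- }
--
-- _WORD_TO_LATEX = {
--     'forall': [r'\\forall'],
--     'thereexists': [r'\\exists'], 'exists': [r'\\exists'],
--     'implies': [r'\\implies'], 'iff': [r'\\iff'],
--     'sum': [r'\\sum'], 'summation': [r'\\sum'], 'product': [r'\\prod'], 'coproduct': [r'\\coprod'],
--     'integral': [r'\\int'], 'doubleintegral': [r'\\iint'], 'tripleintegral': [r'\\iiint'],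
--     'gradient': [r'\\nabla'], 'grad': [r'\\nabla'], 'partial': [r'\\partial'],
--     'union': [r'\\cup'], 'intersection': [r'\\cap'],
--     'subset': [r'\\subset'], 'subseteq': [r'\\subseteq'], 'supset': [r'\\supset'], 'supseteq': [r'\\supseteq'],
--     'infinity': [r'\\infty'], 'emptyset': [r'\\emptyset'], 'nabla': [r'\\nabla'], 'in': [r'\\in'], 'notin': [r'\\notin'],
--     'alpha': [r'\\alpha'], 'beta': [r'\\beta'], 'gamma': [r'\\gamma'], 'delta': [r'\\delta'],
--     'epsilon': [r'\\epsilon'], 'zeta': [r'\\zeta'], 'eta': [r'\\eta'], 'theta': [r'\\theta'],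
--     'iota': [r'\\iota'], 'kappa': [r'\\kappa'], 'lambda': [r'\\lambda'], 'mu': [r'\\mu'],
--     'nu': [r'\\nu'], 'xi': [r'\\xi'], 'pi': [r'\\pi'], 'rho': [r'\\rho'],
--     'sigma': [r'\\sigma'], 'tau': [r'\\tau'], 'upsilon': [r'\\upsilon'], 'phi': [r'\\phi'],
--     'chi': [r'\\chi'], 'psi': [r'\\psi'], 'omega': [r'\\omega'],
-- }
--
-- def _expand_and_normalize_tokens(tokens: List[str], raw_text: str | None = None) -> List[str]:
--     out: List[str] = []
--     seen_once: set[str] = set()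
--     i = 0
--     while i < len(tokens):
--         t = tokens[i]
--         if t.startswith('math_') and t[5:].isdigit():
--             i += 1; continue
--         if t.startswith('\\') and t in _CANON_MATH:
--             t = _CANON_MATH[t]
--         out.append(t)
--         i += 1
--     extras: set[str] = set()
--     for t in out:
--         if not t.startswith('\\'):
--             s = _singularize(t)
--             if s and s != t:
--                 extras.add(s)
--         for la in _WORD_TO_LATEX.get(t, []):
--             extras.add(la)
--     for a, b, la in [('-', '>', r'\\to'), ('=', '>', r'\\implies'), ('<', '-', r'\\leftarrow'),
--                      ('<', '>', r'\\leftrightarrow'), ('<', '=', r'\\leq'), ('>', '=', r'\\geq'), ('!', '=', r'\\neq')]: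
--         for idx in range(len(out) - 1):
--             if out[idx] == a and out[idx + 1] == b:
--                 extras.add(la)
--     if raw_text:
--         rt = raw_text.lower()
--         if 'for all' in rt:
--             extras.add(r'\\forall')
--         if 'there exists' in rt:
--             extras.add(r'\\exists')
--         if 'if and only if' in rt:
--             extras.add(r'\\iff')
--     for la in sorted(extras):
--         if la not in seen_once:
--             out.append(la)
--             seen_once.add(la)
--     return out
-- ===== SOURCE B (Python) =====
-- from typing import List
--
-- # module constants shared with A's module
-- def _singularize(tok: str) -> str:
--     t = tok.lower()
--     if len(t) < 4:
--         return t
--     if t.endswith('ies') and len(t) > 4: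
--         return t[:-3] + 'y'
--     if t.endswith('sses') or t.endswith('zzes'):
--         return t[:-2]
--     if t.endswith('es') and (t[-3] in 'sxz' or t[-4:-2] in ('ch', 'sh')):
--         return t[:-2]
--     if t.endswith('s') and not t.endswith('ss'):
--         return t[:-1]
--     return t
--
-- _CANON_MATH = {
--     r'\\varepsilon': r'\\epsilon',
--     r'\\varphi': r'\\phi',
--     r'\\vartheta': r'\\theta',
--     r'\\varsigma': r'\\sigma',
-- }
--
-- _WORD_TO_LATEX = {
--     'forall': [r'\\forall'],
--     'thereexists': [r'\\exists'], 'exists': [r'\\exists'],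
--     'implies': [r'\\implies'], 'iff': [r'\\iff'],
--     'sum': [r'\\sum'], 'summation': [r'\\sum'], 'product': [r'\\prod'], 'coproduct': [r'\\coprod'],
--     'integral': [r'\\int'], 'doubleintegral': [r'\\iint'], 'tripleintegral': [r'\\iiint'],
--     'gradient': [r'\\nabla'], 'grad': [r'\\nabla'], 'partial': [r'\\partial'],
--     'union': [r'\\cup'], 'intersection': [r'\\cap'],
--     'subset': [r'\\subset'], 'subseteq': [r'\\subseteq'], 'supset': [r'\\supset'], 'supseteq': [r'\\supseteq'],
--     'infinity': [r'\\infty'], 'emptyset': [r'\\emptyset'], 'nabla': [r'\\nabla'], 'in': [r'\\in'], 'notin': [r'\\notin'],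
--     'alpha': [r'\\alpha'], 'beta': [r'\\beta'], 'gamma': [r'\\gamma'], 'delta': [r'\\delta'],
--     'epsilon': [r'\\epsilon'], 'zeta': [r'\\zeta'], 'eta': [r'\\eta'], 'theta': [r'\\theta'],
--     'iota': [r'\\iota'], 'kappa': [r'\\kappa'], 'lambda': [r'\\lambda'], 'mu': [r'\\mu'],
--     'nu': [r'\\nu'], 'xi': [r'\\xi'], 'pi': [r'\\pi'], 'rho': [r'\\rho'],
--     'sigma': [r'\\sigma'], 'tau': [r'\\tau'], 'upsilon': [r'\\upsilon'], 'phi': [r'\\phi'],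
--     'chi': [r'\\chi'], 'psi': [r'\\psi'], 'omega': [r'\\omega'],
-- }
--
-- _PAIR_TO_LATEX = {
--     ('-', '>'): r'\\to', ('=', '>'): r'\\implies', ('<', '-'): r'\\leftarrow',
--     ('<', '>'): r'\\leftrightarrow', ('<', '='): r'\\leq', ('>', '='): r'\\geq', ('!', '='): r'\\neq',
-- }
--
-- _RAW_PHRASES = [('for all', r'\\forall'), ('there exists', r'\\exists'),
--                 ('if and only if', r'\\iff')]
--
-- def _expand_and_normalize_tokens(tokens: List[str], raw_text: str | None = None) -> List[str]:
--     # ONE fused pass over tokens: builds `out`, stems, maps words and detects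
--     # adjacent arrow pairs via a `prev` accumulator, all in the same loop.
--     out: List[str] = []
--     extras: set[str] = set()
--     prev: str | None = None
--     for t in tokens:
--         if t.startswith('math_') and t[5:].isdigit():
--             continue
--         t = _CANON_MATH.get(t, t)
--         if not t.startswith('\\'):
--             s = _singularize(t)
--             if s and s != t:
--                 extras.add(s)
--         extras.update(_WORD_TO_LATEX.get(t, []))
--         if prev is not None and (prev, t) in _PAIR_TO_LATEX:
--             extras.add(_PAIR_TO_LATEX[(prev, t)])
--         prev = t
--         out.append(t)
--     if raw_text:
--         rt = raw_text.lower()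
--         for phrase, la in _RAW_PHRASES:
--             if phrase in rt:
--                 extras.add(la)
--     return out + sorted(extras)
-- ===== Notes on version B (the rewrite author's own statement) =====
-- stated objective: simpler
-- what changed: B replaces A's staged pipeline (index while-loop building out, then a second pass for stems/word synonyms, then seven separate full scans of out for the arrow rules, then a seen_once dedup emission) with ONE fused loop over tokens carrying an (out, extras, prev) accumulator that skips, canonicalizes, stems, maps words and detects arrow pairs via prev and a single pair-keyed map, then appends sorted(extras) directly since a sorted set is already duplicate-free.
import Mathlib
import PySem

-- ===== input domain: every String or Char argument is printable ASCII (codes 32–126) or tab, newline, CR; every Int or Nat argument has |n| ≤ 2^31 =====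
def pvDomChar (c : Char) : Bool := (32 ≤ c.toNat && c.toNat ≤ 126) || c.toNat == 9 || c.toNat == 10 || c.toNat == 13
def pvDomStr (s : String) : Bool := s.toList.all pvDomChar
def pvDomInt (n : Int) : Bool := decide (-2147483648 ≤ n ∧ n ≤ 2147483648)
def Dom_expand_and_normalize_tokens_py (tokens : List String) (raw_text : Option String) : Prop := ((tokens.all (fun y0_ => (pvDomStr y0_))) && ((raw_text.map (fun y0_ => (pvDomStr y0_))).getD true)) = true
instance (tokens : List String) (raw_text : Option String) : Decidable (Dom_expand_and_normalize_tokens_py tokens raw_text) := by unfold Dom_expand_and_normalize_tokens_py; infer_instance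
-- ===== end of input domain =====

-- B fuses A's four staged passes (build out; scan out for stems/word synonyms; seven more
-- scans of out for arrow pairs; dedup-emit) into ONE loop over tokens carrying a
-- (out, extras, prev) accumulator, detecting arrow pairs via prev and one pair-keyed map,
-- and appends sorted(extras) directly without the redundant seen_once set (objective: simpler).

-- ===== PORT A =====
-- shared module constants/helpers of both Pythons
def pvCanonMath : PySem.Dict String String := PySem.Dict.ofList
  [("\\\\varepsilon", "\\\\epsilon"), ("\\\\varphi", "\\\\phi"),
   ("\\\\vartheta", "\\\\theta"), ("\\\\varsigma", "\\\\sigma")]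

def pvWordToLatex : PySem.Dict String (List String) := PySem.Dict.ofList
  [("forall", ["\\\\forall"]),
   ("thereexists", ["\\\\exists"]), ("exists", ["\\\\exists"]),
   ("implies", ["\\\\implies"]), ("iff", ["\\\\iff"]),
   ("sum", ["\\\\sum"]), ("summation", ["\\\\sum"]), ("product", ["\\\\prod"]), ("coproduct", ["\\\\coprod"]),
   ("integral", ["\\\\int"]), ("doubleintegral", ["\\\\iint"]), ("tripleintegral", ["\\\\iiint"]),
   ("gradient", ["\\\\nabla"]), ("grad", ["\\\\nabla"]), ("partial", ["\\\\partial"]),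
   ("union", ["\\\\cup"]), ("intersection", ["\\\\cap"]),
   ("subset", ["\\\\subset"]), ("subseteq", ["\\\\subseteq"]), ("supset", ["\\\\supset"]), ("supseteq", ["\\\\supseteq"]),
   ("infinity", ["\\\\infty"]), ("emptyset", ["\\\\emptyset"]), ("nabla", ["\\\\nabla"]), ("in", ["\\\\in"]), ("notin", ["\\\\notin"]),
   ("alpha", ["\\\\alpha"]), ("beta", ["\\\\beta"]), ("gamma", ["\\\\gamma"]), ("delta", ["\\\\delta"]),
   ("epsilon", ["\\\\epsilon"]), ("zeta", ["\\\\zeta"]), ("eta", ["\\\\eta"]), ("theta", ["\\\\theta"]),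
   ("iota", ["\\\\iota"]), ("kappa", ["\\\\kappa"]), ("lambda", ["\\\\lambda"]), ("mu", ["\\\\mu"]),
   ("nu", ["\\\\nu"]), ("xi", ["\\\\xi"]), ("pi", ["\\\\pi"]), ("rho", ["\\\\rho"]),
   ("sigma", ["\\\\sigma"]), ("tau", ["\\\\tau"]), ("upsilon", ["\\\\upsilon"]), ("phi", ["\\\\phi"]),
   ("chi", ["\\\\chi"]), ("psi", ["\\\\psi"]), ("omega", ["\\\\omega"])]

-- _singularize, on code points (exact port)
def pvSingularizeChars (cs : List Char) : List Char :=
  let t := PySem.Chars.lower cs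
  if t.length < 4 then t
  else if PySem.Chars.endswith t "ies".toList && decide (4 < t.length) then
    PySem.List.slice t none (some (-3)) ++ ['y']
  else if PySem.Chars.endswith t "sses".toList || PySem.Chars.endswith t "zzes".toList then
    PySem.List.slice t none (some (-2))
  else if PySem.Chars.endswith t "es".toList &&
      (PySem.Chars.isIn [PySem.List.pyGetD t (-3) ' '] "sxz".toList
        || decide (PySem.List.slice t (some (-4)) (some (-2)) = "ch".toList)
        || decide (PySem.List.slice t (some (-4)) (some (-2)) = "sh".toList)) then
    PySem.List.slice t none (some (-2))
  else if PySem.Chars.endswith t "s".toList && !PySem.Chars.endswith t "ss".toList then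
    PySem.List.slice t none (some (-1))
  else t

def pvSingularize (tok : String) : String := String.ofList (pvSingularizeChars tok.toList)

-- t.startswith('math_') and t[5:].isdigit()
def pvSkipTok (t : String) : Bool :=
  PySem.Str.startswith t "math_" && PySem.Chars.strIsdigit (PySem.List.slice t.toList (some 5) none)

def pvArrowRules : List (String × String × String) :=
  [("-", ">", "\\\\to"), ("=", ">", "\\\\implies"), ("<", "-", "\\\\leftarrow"),
   ("<", ">", "\\\\leftrightarrow"), ("<", "=", "\\\\leq"), (">", "=", "\\\\geq"), ("!", "=", "\\\\neq")]

def expand_and_normalize_tokens_py (tokens : List String) (raw_text : Option String) : List String :=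
  let out : List String := tokens.foldl (fun out t =>
    if pvSkipTok t = true then out
    else out ++ [if (PySem.Str.startswith t "\\" && pvCanonMath.contains t) = true
                 then pvCanonMath.getD t t else t]) []
  let extras : PySem.Set String := out.foldl (fun ex t =>
    let ex := if (!PySem.Str.startswith t "\\") = true then
        (let s := pvSingularize t
         if s ≠ "" ∧ s ≠ t then PySem.Set.add ex s else ex)
      else ex
    (pvWordToLatex.getD t []).foldl (fun ex la => PySem.Set.add ex la) ex) PySem.Set.empty
  let extras : PySem.Set String := pvArrowRules.foldl (fun ex r =>
    (PySem.List.pyRange 0 (PySem.List.len out - 1) 1).foldl (fun ex idx =>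
      if PySem.List.pyGetD out idx "" = r.1 ∧ PySem.List.pyGetD out (idx + 1) "" = r.2.1
      then PySem.Set.add ex r.2.2 else ex) ex) extras
  let extras : PySem.Set String := match raw_text with
    | none => extras
    | some rt0 =>
      if rt0 ≠ "" then
        let rt := PySem.Str.lower rt0
        let extras := if PySem.Str.isIn "for all" rt = true then PySem.Set.add extras "\\\\forall" else extras
        let extras := if PySem.Str.isIn "there exists" rt = true then PySem.Set.add extras "\\\\exists" else extras
        if PySem.Str.isIn "if and only if" rt = true then PySem.Set.add extras "\\\\iff" else extras
      else extras
  let fin := (PySem.List.sorted extras (fun x => x) false).foldl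
    (fun (p : List String × PySem.Set String) la =>
      if la ∉ p.2 then (p.1 ++ [la], PySem.Set.add p.2 la) else p) (out, PySem.Set.empty)
  fin.1

-- ===== PORT B =====
def pvPairMap : PySem.Dict (String × String) String := PySem.Dict.ofList
  [(("-", ">"), "\\\\to"), (("=", ">"), "\\\\implies"), (("<", "-"), "\\\\leftarrow"),
   (("<", ">"), "\\\\leftrightarrow"), (("<", "="), "\\\\leq"), ((">", "="), "\\\\geq"), (("!", "="), "\\\\neq")]

def pvRawPhrases : List (String × String) :=
  [("for all", "\\\\forall"), ("there exists", "\\\\exists"), ("if and only if", "\\\\iff")]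

-- the body of B's single fused loop: skip, canonicalize, stem, word synonyms,
-- arrow pair via prev, then extend out and move prev
def pvFusedStep (st : List String × PySem.Set String × Option String) (t0 : String) :
    List String × PySem.Set String × Option String :=
  if pvSkipTok t0 = true then st
  else
    let t := pvCanonMath.getD t0 t0
    let ex := if (!PySem.Str.startswith t "\\") = true then
        (let s := pvSingularize t
         if s ≠ "" ∧ s ≠ t then PySem.Set.add st.2.1 s else st.2.1)
      else st.2.1
    let ex := (pvWordToLatex.getD t []).foldl (fun ex la => PySem.Set.add ex la) ex
    let ex := match st.2.2 with
      | some p =>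
        (match pvPairMap.get? (p, t) with
         | some la => PySem.Set.add ex la
         | none => ex)
      | none => ex
    (st.1 ++ [t], ex, some t)

-- B's raw_text block: one loop over the phrase table
def pvRawB (extras : PySem.Set String) (raw_text : Option String) : PySem.Set String :=
  match raw_text with
  | none => extras
  | some rt0 =>
    if rt0 ≠ "" then
      let rt := PySem.Str.lower rt0
      pvRawPhrases.foldl (fun ex pl =>
        if PySem.Str.isIn pl.1 rt = true then PySem.Set.add ex pl.2 else ex) extras
    else extras

def expand_and_normalize_tokens_py_alt (tokens : List String) (raw_text : Option String) : List String :=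
  let st := tokens.foldl pvFusedStep ([], PySem.Set.empty, none)
  let extras := pvRawB st.2.1 raw_text
  st.1 ++ PySem.List.sorted extras (fun x => x) false

-- ===== PRECONDITION & SPEC =====
def Spec_expand_and_normalize_tokens_py (tokens : List String) (raw_text : Option String) (out : List String) : Prop := out = expand_and_normalize_tokens_py_alt tokens raw_text
instance (tokens : List String) (raw_text : Option String) (out : List String) : Decidable (Spec_expand_and_normalize_tokens_py tokens raw_text out) := by unfold Spec_expand_and_normalize_tokens_py; infer_instance

-- ===== CLAIM (what is proved, stated in full; the proofs are below) =====
def Claim_equal_expand_and_normalize_tokens_py : Prop := ∀ (tokens : List String) (raw_text : Option String), Dom_expand_and_normalize_tokens_py tokens raw_text → Spec_expand_and_normalize_tokens_py tokens raw_text (expand_and_normalize_tokens_py tokens raw_text)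

-- ===== LEMMAS AND PROOFS =====
-- per-token contribution of the stemming/word-synonym step (shared by both programs)
def pvQbase (t y : String) : Prop :=
  ((!PySem.Str.startswith t "\\") = true ∧ pvSingularize t ≠ "" ∧ pvSingularize t ≠ t ∧ y = pvSingularize t)
  ∨ y ∈ pvWordToLatex.getD t []

-- a fold whose every step preserves Nodup keeps Nodup
theorem pvNodupFoldl {A B : Type} (f : List B → A → List B)
    (h : ∀ s x, s.Nodup → (f s x).Nodup) :
    ∀ (l : List A) (s : List B), s.Nodup → (l.foldl f s).Nodup := by
  intro l
  induction l with
  | nil => intro s hs; exact hs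
  | cons x l ih => intro s hs; exact ih _ (h s x hs)

-- membership through a fold whose step adds exactly the elements characterized by Q
theorem pvMemFoldl {A B : Type} (f : List B → A → List B) (Q : A → B → Prop)
    (h : ∀ s x y, y ∈ f s x ↔ y ∈ s ∨ Q x y) :
    ∀ (l : List A) (s : List B) (y : B), y ∈ l.foldl f s ↔ y ∈ s ∨ ∃ x ∈ l, Q x y := by
  intro l
  induction l with
  | nil => simp
  | cons x l ih =>
    intro s y
    rw [List.foldl_cons, ih, h]
    constructor
    · rintro ((hy | hq) | ⟨x', hx', hq⟩)
      · exact Or.inl hy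
      · exact Or.inr ⟨x, List.mem_cons_self, hq⟩
      · exact Or.inr ⟨x', List.mem_cons_of_mem _ hx', hq⟩
    · rintro (hy | ⟨x', hx', hq⟩)
      · exact Or.inl (Or.inl hy)
      · rcases List.mem_cons.mp hx' with rfl | hx'
        · exact Or.inl (Or.inr hq)
        · exact Or.inr ⟨x', hx', hq⟩

-- A's guarded canonicalization equals B's plain dict lookup with default
theorem pvCanonEq (t : String) :
    (if (PySem.Str.startswith t "\\" && pvCanonMath.contains t) = true
     then pvCanonMath.getD t t else t) = pvCanonMath.getD t t := by
  by_cases hc : pvCanonMath.contains t = true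
  · have ht : t ∈ pvCanonMath.keys := (PySem.Dict.contains_iff_mem_keys _ _).mp hc
    have hk : pvCanonMath.keys = ["\\\\varepsilon", "\\\\varphi", "\\\\vartheta", "\\\\varsigma"] := by decide
    rw [hk] at ht
    simp only [List.mem_cons, List.not_mem_nil, or_false] at ht
    rcases ht with rfl | rfl | rfl | rfl <;> decide
  · have hc' : pvCanonMath.contains t = false := by
      cases h : pvCanonMath.contains t
      · rfl
      · exact absurd h hc
    rw [PySem.Dict.getD_of_not_contains _ _ hc']
    simp [hc']

-- A's while-loop over tokens builds the filter+map of the kept canonical tokens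
theorem pvOutEq (tokens : List String) :
    tokens.foldl (fun out t =>
      if pvSkipTok t = true then out
      else out ++ [if (PySem.Str.startswith t "\\" && pvCanonMath.contains t) = true
                   then pvCanonMath.getD t t else t]) [] =
    (tokens.filter (fun t => !pvSkipTok t)).map (fun t => pvCanonMath.getD t t) := by
  have hstep : (fun (out : List String) t =>
      if pvSkipTok t = true then out
      else out ++ [if (PySem.Str.startswith t "\\" && pvCanonMath.contains t) = true
                   then pvCanonMath.getD t t else t]) =
      (fun (out : List String) t =>
        if (!pvSkipTok t) = true then out ++ [pvCanonMath.getD t t] else out) := by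
    funext out t
    rw [pvCanonEq]
    by_cases hs : pvSkipTok t = true <;> simp [hs]
  rw [hstep, PySem.List.foldl_append_if]
  simp

-- lookup in the pair dict is exactly "some rule applies"
theorem pvPairGet (a b y : String) :
    pvPairMap.get? (a, b) = some y ↔ ∃ r ∈ pvArrowRules, a = r.1 ∧ b = r.2.1 ∧ y = r.2.2 := by
  constructor
  · intro h
    have hm := PySem.Dict.mem_items_of_get?_eq_some _ h
    have hit : pvPairMap.items =
        [(("-", ">"), "\\\\to"), (("=", ">"), "\\\\implies"), (("<", "-"), "\\\\leftarrow"),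
         (("<", ">"), "\\\\leftrightarrow"), (("<", "="), "\\\\leq"), ((">", "="), "\\\\geq"),
         (("!", "="), "\\\\neq")] := by decide
    rw [hit] at hm
    simp only [List.mem_cons, List.not_mem_nil, or_false, Prod.mk.injEq] at hm
    rcases hm with ⟨⟨rfl, rfl⟩, rfl⟩ | ⟨⟨rfl, rfl⟩, rfl⟩ | ⟨⟨rfl, rfl⟩, rfl⟩ | ⟨⟨rfl, rfl⟩, rfl⟩ |
      ⟨⟨rfl, rfl⟩, rfl⟩ | ⟨⟨rfl, rfl⟩, rfl⟩ | ⟨⟨rfl, rfl⟩, rfl⟩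
    · exact ⟨("-", ">", "\\\\to"), by decide, rfl, rfl, rfl⟩
    · exact ⟨("=", ">", "\\\\implies"), by decide, rfl, rfl, rfl⟩
    · exact ⟨("<", "-", "\\\\leftarrow"), by decide, rfl, rfl, rfl⟩
    · exact ⟨("<", ">", "\\\\leftrightarrow"), by decide, rfl, rfl, rfl⟩
    · exact ⟨("<", "=", "\\\\leq"), by decide, rfl, rfl, rfl⟩
    · exact ⟨(">", "=", "\\\\geq"), by decide, rfl, rfl, rfl⟩
    · exact ⟨("!", "=", "\\\\neq"), by decide, rfl, rfl, rfl⟩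
  · rintro ⟨r, hr, rfl, rfl, rfl⟩
    simp only [pvArrowRules, List.mem_cons, List.not_mem_nil, or_false] at hr
    rcases hr with rfl | rfl | rfl | rfl | rfl | rfl | rfl <;> decide

-- adjacent-index condition on out = membership of the pair in zip(out, out[1:])
theorem pvZipIdx (out : List String) (a b : String) :
    (∃ idx ∈ PySem.List.pyRange 0 (PySem.List.len out - 1) 1,
       PySem.List.pyGetD out idx "" = a ∧ PySem.List.pyGetD out (idx + 1) "" = b) ↔
    (a, b) ∈ out.zip out.tail := by
  constructor
  · rintro ⟨idx, hmem, ha, hb⟩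
    rw [PySem.List.mem_pyRange_one] at hmem
    simp only [PySem.List.len_eq] at hmem
    obtain ⟨h0, h1⟩ := hmem
    have hlt : idx < (out.length : Int) := by omega
    have hk1 : idx.toNat + 1 < out.length := by omega
    rw [PySem.List.pyGetD_eq_getElem _ _ h0 hlt] at ha
    rw [PySem.List.pyGetD_eq_getElem _ _ (by omega) (by omega)] at hb
    have hkn : (idx + 1).toNat = idx.toNat + 1 := by omega
    apply List.mem_iff_getElem.mpr
    refine ⟨idx.toNat, by simp only [List.length_zip, List.length_tail]; omega, ?_⟩
    rw [List.getElem_zip, List.getElem_tail]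
    exact Prod.ext ha (by simpa [hkn] using hb)
  · intro hab
    obtain ⟨k, hkl, hk⟩ := List.mem_iff_getElem.mp hab
    simp only [List.length_zip, List.length_tail] at hkl
    have hk1 : k + 1 < out.length := by omega
    rw [List.getElem_zip, List.getElem_tail] at hk
    refine ⟨(k : Int), ?_, ?_, ?_⟩
    · rw [PySem.List.mem_pyRange_one]
      simp only [PySem.List.len_eq]
      omega
    · rw [PySem.List.pyGetD_eq_getElem _ _ (by omega) (by omega)]
      simpa using congrArg Prod.fst hk
    · rw [PySem.List.pyGetD_eq_getElem _ _ (by omega) (by omega)]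
      have hkn : ((k : Int) + 1).toNat = k + 1 := by omega
      simpa [hkn] using congrArg Prod.snd hk

-- membership after A's seven scans
theorem pvMemPairA (out : List String) (s : PySem.Set String) (y : String) :
    (y ∈ pvArrowRules.foldl (fun ex r =>
      (PySem.List.pyRange 0 (PySem.List.len out - 1) 1).foldl (fun ex idx =>
        if PySem.List.pyGetD out idx "" = r.1 ∧ PySem.List.pyGetD out (idx + 1) "" = r.2.1
        then PySem.Set.add ex r.2.2 else ex) ex) s) ↔
    y ∈ s ∨ ∃ r ∈ pvArrowRules, ∃ idx ∈ PySem.List.pyRange 0 (PySem.List.len out - 1) 1,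
      (PySem.List.pyGetD out idx "" = r.1 ∧ PySem.List.pyGetD out (idx + 1) "" = r.2.1) ∧ y = r.2.2 := by
  apply pvMemFoldl
  intro s' r y'
  apply pvMemFoldl
  intro s'' idx y''
  by_cases hc : PySem.List.pyGetD out idx "" = r.1 ∧ PySem.List.pyGetD out (idx + 1) "" = r.2.1 <;>
    simp [hc, PySem.Set.mem_add]

-- A's seven-scan condition coincides with "an adjacent pair hits the pair map"
theorem pvBridge (out : List String) (y : String) :
    (∃ r ∈ pvArrowRules, ∃ idx ∈ PySem.List.pyRange 0 (PySem.List.len out - 1) 1,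
      (PySem.List.pyGetD out idx "" = r.1 ∧ PySem.List.pyGetD out (idx + 1) "" = r.2.1) ∧ y = r.2.2) ↔
    ∃ ab ∈ out.zip out.tail, pvPairMap.get? ab = some y := by
  constructor
  · rintro ⟨r, hr, idx, hi, ⟨h1, h2⟩, rfl⟩
    refine ⟨(r.1, r.2.1), (pvZipIdx out r.1 r.2.1).mp ⟨idx, hi, h1, h2⟩, ?_⟩
    exact (pvPairGet _ _ _).mpr ⟨r, hr, rfl, rfl, rfl⟩
  · rintro ⟨⟨a, b⟩, hab, hget⟩
    obtain ⟨r, hr, rfl, rfl, rfl⟩ := (pvPairGet a b y).mp hget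
    obtain ⟨idx, hi, h1, h2⟩ := (pvZipIdx out r.1 r.2.1).mpr hab
    exact ⟨r, hr, idx, hi, ⟨h1, h2⟩, rfl⟩

-- membership through the shared stem/word-synonym step
theorem pvMemStepBase (ex : PySem.Set String) (t y : String) :
    (y ∈ (pvWordToLatex.getD t []).foldl (fun ex la => PySem.Set.add ex la)
      (if (!PySem.Str.startswith t "\\") = true then
        (let s := pvSingularize t
         if s ≠ "" ∧ s ≠ t then PySem.Set.add ex s else ex)
      else ex)) ↔ y ∈ ex ∨ pvQbase t y := by
  have hw : ∀ (s0 : PySem.Set String),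
      y ∈ (pvWordToLatex.getD t []).foldl (fun ex la => PySem.Set.add ex la) s0 ↔
      y ∈ s0 ∨ y ∈ pvWordToLatex.getD t [] := by
    intro s0
    rw [pvMemFoldl (fun ex la => PySem.Set.add ex la) (fun la y => y = la)
      (by intro s x y'; simp [PySem.Set.mem_add]) (pvWordToLatex.getD t []) s0 y]
    simp
  rw [hw]
  dsimp only
  unfold pvQbase
  by_cases h1 : (!PySem.Str.startswith t "\\") = true
  · by_cases h2 : pvSingularize t ≠ "" ∧ pvSingularize t ≠ t
    · rw [if_pos h1, if_pos h2]
      rw [PySem.Set.mem_add]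
      obtain ⟨h2a, h2b⟩ := h2
      constructor
      · rintro ((hy | rfl) | hww)
        · exact Or.inl hy
        · exact Or.inr (Or.inl ⟨h1, h2a, h2b, rfl⟩)
        · exact Or.inr (Or.inr hww)
      · rintro (hy | (⟨_, _, _, hys⟩ | hww))
        · exact Or.inl (Or.inl hy)
        · exact Or.inl (Or.inr hys)
        · exact Or.inr hww
    · rw [if_pos h1, if_neg h2]
      constructor
      · rintro (hy | hww)
        · exact Or.inl hy
        · exact Or.inr (Or.inr hww)
      · rintro (hy | (⟨_, ha, hb, _⟩ | hww))
        · exact Or.inl hy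
        · exact absurd ⟨ha, hb⟩ h2
        · exact Or.inr hww
  · rw [if_neg h1]
    constructor
    · rintro (hy | hww)
      · exact Or.inl hy
      · exact Or.inr (Or.inr hww)
    · rintro (hy | (⟨hc, _⟩ | hww))
      · exact Or.inl hy
      · exact absurd hc h1
      · exact Or.inr hww

-- the shared stem/word-synonym step preserves Nodup
theorem pvNodupStepBase (ex : PySem.Set String) (t : String) (h : ex.Nodup) :
    ((pvWordToLatex.getD t []).foldl (fun ex la => PySem.Set.add ex la)
      (if (!PySem.Str.startswith t "\\") = true then
        (let s := pvSingularize t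
         if s ≠ "" ∧ s ≠ t then PySem.Set.add ex s else ex)
      else ex)).Nodup := by
  refine pvNodupFoldl _ (fun s' la h' => PySem.Set.nodup_add _ _ h') _ _ ?_
  dsimp only
  split_ifs <;> first | exact h | exact PySem.Set.nodup_add _ _ h

-- membership after A's stem/word-synonym pass over out
theorem pvMemBase (out : List String) (s : PySem.Set String) (y : String) :
    (y ∈ out.foldl (fun ex t =>
      let ex := if (!PySem.Str.startswith t "\\") = true then
          (let s := pvSingularize t
           if s ≠ "" ∧ s ≠ t then PySem.Set.add ex s else ex)
        else ex
      (pvWordToLatex.getD t []).foldl (fun ex la => PySem.Set.add ex la) ex) s) ↔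
    y ∈ s ∨ ∃ t ∈ out, pvQbase t y := by
  apply pvMemFoldl
  intro s' t y'
  exact pvMemStepBase s' t y'

theorem pvNodupBase (out : List String) (s : PySem.Set String) (hs : s.Nodup) :
    (out.foldl (fun ex t =>
      let ex := if (!PySem.Str.startswith t "\\") = true then
          (let s := pvSingularize t
           if s ≠ "" ∧ s ≠ t then PySem.Set.add ex s else ex)
        else ex
      (pvWordToLatex.getD t []).foldl (fun ex la => PySem.Set.add ex la) ex) s).Nodup := by
  apply pvNodupFoldl _ ?_ _ _ hs
  intro s' t h'
  exact pvNodupStepBase s' t h'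

theorem pvNodupPairA (out : List String) (s : PySem.Set String) (hs : s.Nodup) :
    (pvArrowRules.foldl (fun ex r =>
      (PySem.List.pyRange 0 (PySem.List.len out - 1) 1).foldl (fun ex idx =>
        if PySem.List.pyGetD out idx "" = r.1 ∧ PySem.List.pyGetD out (idx + 1) "" = r.2.1
        then PySem.Set.add ex r.2.2 else ex) ex) s).Nodup := by
  apply pvNodupFoldl _ ?_ _ _ hs
  intro s' r hs'
  apply pvNodupFoldl _ ?_ _ _ hs'
  intro s'' idx hs''
  split_ifs <;> first | exact hs'' | exact PySem.Set.nodup_add _ _ hs''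

-- membership through B's prev-pair step
theorem pvMemStepPair (ex : PySem.Set String) (prev : Option String) (t y : String) :
    (y ∈ (match prev with
       | some p =>
         (match pvPairMap.get? (p, t) with
          | some la => PySem.Set.add ex la
          | none => ex)
       | none => ex)) ↔ y ∈ ex ∨ ∃ p, prev = some p ∧ pvPairMap.get? (p, t) = some y := by
  cases prev with
  | none => simp
  | some p =>
    cases h : pvPairMap.get? (p, t) with
    | none => simp [h]
    | some la => simp [h, PySem.Set.mem_add, eq_comm]

theorem pvNodupStepPair (ex : PySem.Set String) (prev : Option String) (t : String) (h : ex.Nodup) :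
    ((match prev with
       | some p =>
         (match pvPairMap.get? (p, t) with
          | some la => PySem.Set.add ex la
          | none => ex)
       | none => ex) : PySem.Set String).Nodup := by
  cases prev with
  | none => exact h
  | some p =>
    dsimp only
    cases hp : pvPairMap.get? (p, t) with
    | none => exact h
    | some la => exact PySem.Set.nodup_add _ _ h

-- appending one element extends the adjacent-pair list by the (last, new) pair
theorem pvZipConcat (o : List String) (x : String) :
    (o ++ [x]).zip (o ++ [x]).tail
      = o.zip o.tail ++ (match o.getLast? with | some p => [(p, x)] | none => []) := by
  induction o with
  | nil => simp
  | cons h tl ih =>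
    cases tl with
    | nil => simp
    | cons h2 tl2 =>
      simp only [List.cons_append, List.tail_cons, List.zip_cons_cons] at *
      rw [ih]
      simp [List.getLast?_cons_cons]

-- the invariant of B's fused loop: out is the kept canonical tokens, prev its last
-- element, and extras holds exactly the stems/synonyms and adjacent-pair arrows of out
theorem pvFusedInv (tokens : List String) :
    (tokens.foldl pvFusedStep ([], PySem.Set.empty, none)).1
        = (tokens.filter (fun t => !pvSkipTok t)).map (fun t => pvCanonMath.getD t t)
    ∧ (tokens.foldl pvFusedStep ([], PySem.Set.empty, none)).2.2
        = (tokens.foldl pvFusedStep ([], PySem.Set.empty, none)).1.getLast?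
    ∧ (tokens.foldl pvFusedStep ([], PySem.Set.empty, none)).2.1.Nodup
    ∧ ∀ y, (y ∈ (tokens.foldl pvFusedStep ([], PySem.Set.empty, none)).2.1) ↔
        ((∃ t ∈ (tokens.foldl pvFusedStep ([], PySem.Set.empty, none)).1, pvQbase t y)
         ∨ ∃ ab ∈ (tokens.foldl pvFusedStep ([], PySem.Set.empty, none)).1.zip
             (tokens.foldl pvFusedStep ([], PySem.Set.empty, none)).1.tail,
             pvPairMap.get? ab = some y) := by
  induction tokens using List.reverseRecOn with
  | nil =>
    refine ⟨rfl, rfl, ?_, ?_⟩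
    · simp [PySem.Set.empty]
    · intro y; simp [PySem.Set.empty]
  | append_singleton ts t ih =>
    obtain ⟨ih1, ih2, ih3, ih4⟩ := ih
    rw [List.foldl_append, List.foldl_cons, List.foldl_nil]
    by_cases hs : pvSkipTok t = true
    · rw [pvFusedStep, if_pos hs]
      refine ⟨?_, ih2, ih3, ih4⟩
      rw [ih1]
      simp [List.filter_append, hs]
    · rw [pvFusedStep, if_neg hs]
      dsimp only
      refine ⟨?_, ?_, ?_, ?_⟩
      · rw [ih1]
        simp [List.filter_append, List.map_append, hs]
      · rw [List.getLast?_concat]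
      · exact pvNodupStepPair _ _ _ (pvNodupStepBase _ _ ih3)
      · intro y
        rw [pvMemStepPair, pvMemStepBase, ih4 y, ih2, pvZipConcat]
        cases hlast : (ts.foldl pvFusedStep ([], PySem.Set.empty, none)).1.getLast? with
        | none =>
          have hnil : (ts.foldl pvFusedStep ([], PySem.Set.empty, none)).1 = [] :=
            List.getLast?_eq_none_iff.mp hlast
          rw [hnil]
          simp
        | some p =>
          constructor
          · rintro (((⟨u, hu, hq⟩ | ⟨ab, hab, hget⟩) | hq') | ⟨p', hp', hget⟩)
            · exact Or.inl ⟨u, List.mem_append_left _ hu, hq⟩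
            · exact Or.inr ⟨ab, List.mem_append_left _ hab, hget⟩
            · exact Or.inl ⟨pvCanonMath.getD t t,
                List.mem_append_right _ (List.mem_singleton_self _), hq'⟩
            · rw [show p' = p from (Option.some.inj hp').symm] at hget
              exact Or.inr ⟨(p, pvCanonMath.getD t t),
                List.mem_append_right _ (List.mem_singleton_self _), hget⟩
          · rintro (⟨u, hu, hq⟩ | ⟨ab, hab, hget⟩)
            · rcases List.mem_append.mp hu with h | h
              · exact Or.inl (Or.inl (Or.inl ⟨u, h, hq⟩))
              · obtain rfl : u = pvCanonMath.getD t t := List.mem_singleton.mp h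
                exact Or.inl (Or.inr hq)
            · rcases List.mem_append.mp hab with h | h
              · exact Or.inl (Or.inl (Or.inr ⟨ab, h, hget⟩))
              · obtain rfl : ab = (p, pvCanonMath.getD t t) := List.mem_singleton.mp h
                exact Or.inr ⟨p, rfl, hget⟩

-- A's raw_text if-chain and B's phrase-table loop add the same phrases
theorem pvMemRawAB (E1 E2 : PySem.Set String) (rt : Option String)
    (h : ∀ y, y ∈ E1 ↔ y ∈ E2) (y : String) :
    (y ∈ (match rt with
      | none => E1
      | some rt0 =>
        if rt0 ≠ "" then
          let r := PySem.Str.lower rt0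
          let e := if PySem.Str.isIn "for all" r = true then PySem.Set.add E1 "\\\\forall" else E1
          let e := if PySem.Str.isIn "there exists" r = true then PySem.Set.add e "\\\\exists" else e
          if PySem.Str.isIn "if and only if" r = true then PySem.Set.add e "\\\\iff" else e
        else E1)) ↔ y ∈ pvRawB E2 rt := by
  cases rt with
  | none => simpa [pvRawB] using h y
  | some rt0 =>
    simp only [pvRawB, pvRawPhrases, List.foldl_cons, List.foldl_nil]
    split_ifs <;> simp [PySem.Set.mem_add, h y]

theorem pvNodupRawB (E : PySem.Set String) (rt : Option String) (h : E.Nodup) :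
    (pvRawB E rt).Nodup := by
  cases rt with
  | none => exact h
  | some rt0 =>
    simp only [pvRawB]
    split_ifs with h0
    · refine pvNodupFoldl _ ?_ _ _ h
      intro s pl hs
      split_ifs <;> first | exact hs | exact PySem.Set.nodup_add _ _ hs
    · exact h

theorem pvNodupRawA (E : PySem.Set String) (rt : Option String) (h : E.Nodup) :
    ((match rt with
      | none => E
      | some rt0 =>
        if rt0 ≠ "" then
          let r := PySem.Str.lower rt0
          let e := if PySem.Str.isIn "for all" r = true then PySem.Set.add E "\\\\forall" else E
          let e := if PySem.Str.isIn "there exists" r = true then PySem.Set.add e "\\\\exists" else e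
          if PySem.Str.isIn "if and only if" r = true then PySem.Set.add e "\\\\iff" else e
        else E) : PySem.Set String).Nodup := by
  cases rt with
  | none => exact h
  | some rt0 =>
    dsimp only
    split_ifs <;>
    first
      | exact h
      | exact PySem.Set.nodup_add _ _ h
      | exact PySem.Set.nodup_add _ _ (PySem.Set.nodup_add _ _ h)
      | exact PySem.Set.nodup_add _ _ (PySem.Set.nodup_add _ _ (PySem.Set.nodup_add _ _ h))

-- A's seen_once emission over a duplicate-free list appends it whole
theorem pvEmit : ∀ (l : List String), l.Nodup → ∀ (out : List String) (seen : PySem.Set String),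
    (∀ la ∈ l, la ∉ seen) →
    (l.foldl (fun (p : List String × PySem.Set String) la =>
      if la ∉ p.2 then (p.1 ++ [la], PySem.Set.add p.2 la) else p) (out, seen)).1 = out ++ l := by
  intro l
  induction l with
  | nil => intro _ out seen _; simp
  | cons la l ih =>
    intro hnd out seen hfresh
    rw [List.foldl_cons]
    have hla : la ∉ seen := hfresh la (List.mem_cons_self)
    rw [if_pos hla]
    rw [ih hnd.of_cons (out ++ [la]) (PySem.Set.add seen la) ?_]
    · simp
    · intro x hx
      rw [PySem.Set.mem_add]
      rintro (hmem | rfl)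
      · exact hfresh x (List.mem_cons_of_mem _ hx) hmem
      · exact (List.nodup_cons.mp hnd).1 hx

-- sorted-then-dedup-emit equals appending the sorted other set, given same members
theorem pvTail (out : List String) (E1 E2 : PySem.Set String)
    (hmem : ∀ y, y ∈ E1 ↔ y ∈ E2) (hn1 : E1.Nodup) (hn2 : E2.Nodup) :
    ((PySem.List.sorted E1 (fun x => x) false).foldl
      (fun (p : List String × PySem.Set String) la =>
        if la ∉ p.2 then (p.1 ++ [la], PySem.Set.add p.2 la) else p) (out, PySem.Set.empty)).1
    = out ++ PySem.List.sorted E2 (fun x => x) false := by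
  have hperm := (List.perm_ext_iff_of_nodup hn1 hn2).mpr hmem
  rw [PySem.List.sorted_eq_sorted_of_perm _ _ (fun (x : String) => x) (fun a b h => h) hperm]
  apply pvEmit
  · exact ((PySem.List.sorted_perm _ _ _).nodup_iff).mpr hn2
  · intro la _ hmem'
    simp [PySem.Set.empty] at hmem'

-- ===== VERDICT (by name: the statement is the Claim_ definition above) =====
theorem expand_and_normalize_tokens_py_spec : Claim_equal_expand_and_normalize_tokens_py := by
  intro tokens raw_text _
  show expand_and_normalize_tokens_py tokens raw_text = expand_and_normalize_tokens_py_alt tokens raw_text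
  obtain ⟨h1, h2, h3, h4⟩ := pvFusedInv tokens
  unfold expand_and_normalize_tokens_py expand_and_normalize_tokens_py_alt
  rw [pvOutEq, ← h1]
  apply pvTail
  · intro y
    apply pvMemRawAB
    intro y'
    rw [pvMemPairA, pvMemBase, h4 y', pvBridge]
    simp [PySem.Set.empty]
  · exact pvNodupRawA _ _ (pvNodupPairA _ _ (pvNodupBase _ _ (by simp [PySem.Set.empty])))
  · exact pvNodupRawB _ _ h3
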